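-- pv_equiv track=rewrite | github.com/model-checking/cbmc-viewer | cbmc_viewer/markup_code.py | split_code_into_blocks
-- ===== SOURCE A (Python) =====
-- def split_code_into_blocks(code):
--     """Split code into blocks of code, comments, and string literals."""
--
--     def is_noncode_start(code, idx=0):
--         """String starts something other than source code (eg, a comment)."""
--
--         return (is_quote(code, idx) or
--                 is_multiline_comment_start(code, idx) or
--                 is_singleline_comment_start(code, idx))
--
--     def find_predicate(code, predicate, idx=0):
--         """First position in a string satisfying a predicate."""
--
--         while idx < len(code) and not predicate(code, idx):
--             idx += 1
--         return idx
--
--     blocks = []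
--
--     while code:
--         idx = find_predicate(code, is_noncode_start)
--         block, code, idx = code[:idx], code[idx:], 0
--         if block:
--             blocks.append(block)
--
--         if not code:
--             break
--
--         if is_quote(code):
--             idx = find_predicate(code, is_quote, 1)
--         elif is_multiline_comment_start(code):
--             idx = find_predicate(code, is_multiline_comment_end, 2)
--         elif is_singleline_comment_start(code):
--             idx = find_predicate(code, is_singleline_comment_end, 2)
--         block, code, idx = code[:idx+1], code[idx+1:], 0
--         if block:
--             blocks.append(block)
--
--     return blocks
--
-- def is_quote(code, idx=0):
--     """Position in string is an unescaped quotation mark."""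
--     return (0 <= idx < len(code) and
--             code[idx] == '"' and
--             (idx == 0 or code[idx-1] != '\\'))
--
-- def is_multiline_comment_start(code, idx=0):
--     """Position in string starts a multi-line comment."""
--     return idx >= 0 and idx+2 <= len(code) and code[idx:idx+2] == '/*'
--
-- def is_multiline_comment_end(code, idx=0):
--     """Position in string ends a multi-line comment."""
--     return idx-1 >= 0 and idx+1 <= len(code) and code[idx-1:idx+1] == '*/'
--
-- def is_singleline_comment_start(code, idx=0):
--     """Position in string starts a one-line comment."""
--     return idx >= 0 and idx+2 <= len(code) and code[idx:idx+2] == '//'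
--
-- def is_singleline_comment_end(code, idx=0):
--     """Position in string ends a one-line comment."""
--     return idx >= 0 and idx+1 < len(code) and code[idx+1] == '\n'
-- ===== SOURCE B (Python) =====
-- def split_code_into_blocks(code):
--     """Split code into blocks of code, comments, and string literals."""
--     # Single left-to-right pass over absolute indices; slices only the final
--     # substrings (never rebuilds the remaining string).
--     blocks = []
--     n = len(code)
--     f = 0  # start of the pending plain-code block
--     i = 0
--     while i < n:
--         if code[i] == '"' and (i == f or code[i - 1] != '\\'):
--             if f < i:
--                 blocks.append(code[f:i])
--             j = i + 1
--             while j < n and not (code[j] == '"' and code[j - 1] != '\\'):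
--                 j += 1
--             end = min(j + 1, n)
--             blocks.append(code[i:end])
--             i = f = end
--         elif code[i:i + 2] == '/*':
--             if f < i:
--                 blocks.append(code[f:i])
--             j = i + 2
--             while j < n and not (code[j - 1] == '*' and code[j] == '/'):
--                 j += 1
--             end = min(j + 1, n)
--             blocks.append(code[i:end])
--             i = f = end
--         elif code[i:i + 2] == '//':
--             if f < i:
--                 blocks.append(code[f:i])
--             j = i + 2
--             while j < n and not (j + 1 < n and code[j + 1] == '\n'):
--                 j += 1
--             end = min(j + 1, n)
--             blocks.append(code[i:end])
--             i = f = end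
--         else:
--             i += 1
--     if f < n:
--         blocks.append(code[f:n])
--     return blocks
-- ===== Notes on version B (the rewrite author's own statement) =====
-- stated objective: faster
-- what changed: Replaces A's repeated re-slicing of the remaining string and restartable predicate scans with one left-to-right pass over absolute index pointers that slices only the final output substrings.
import Mathlib
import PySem

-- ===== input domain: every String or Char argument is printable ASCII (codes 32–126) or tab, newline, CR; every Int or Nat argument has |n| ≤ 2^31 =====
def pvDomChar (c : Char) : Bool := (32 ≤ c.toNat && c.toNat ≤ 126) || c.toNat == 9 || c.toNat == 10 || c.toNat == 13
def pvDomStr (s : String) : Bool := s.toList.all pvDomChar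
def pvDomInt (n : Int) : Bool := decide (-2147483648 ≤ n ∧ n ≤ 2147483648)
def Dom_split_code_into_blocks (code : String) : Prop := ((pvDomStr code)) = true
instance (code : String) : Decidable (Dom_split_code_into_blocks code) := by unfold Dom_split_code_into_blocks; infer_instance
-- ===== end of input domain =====

-- B replaces A's repeated re-slicing of the remaining string with one left-to-right
-- pass over absolute index pointers; objective: faster (O(n) vs O(n^2) worst case).

-- ===== PORT A =====
-- is_quote(code, idx)
def pvIsQuote (cs : List Char) (idx : Nat) : Bool :=
  decide (idx < cs.length) && (cs.getD idx ' ' == '"') &&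
    (decide (idx = 0) || !(cs.getD (idx - 1) ' ' == '\\'))

-- is_multiline_comment_start(code, idx)
def pvMlStart (cs : List Char) (idx : Nat) : Bool :=
  decide (idx + 2 ≤ cs.length) && ((cs.drop idx).take 2 == ['/', '*'])

-- is_multiline_comment_end(code, idx)
def pvMlEnd (cs : List Char) (idx : Nat) : Bool :=
  decide (1 ≤ idx) && decide (idx + 1 ≤ cs.length) && ((cs.drop (idx - 1)).take 2 == ['*', '/'])

-- is_singleline_comment_start(code, idx)
def pvSlStart (cs : List Char) (idx : Nat) : Bool :=
  decide (idx + 2 ≤ cs.length) && ((cs.drop idx).take 2 == ['/', '/'])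

-- is_singleline_comment_end(code, idx)
def pvSlEnd (cs : List Char) (idx : Nat) : Bool :=
  decide (idx + 1 < cs.length) && (cs.getD (idx + 1) ' ' == '\n')

-- is_noncode_start(code, idx)
def pvNoncodeStart (cs : List Char) (idx : Nat) : Bool :=
  pvIsQuote cs idx || pvMlStart cs idx || pvSlStart cs idx

-- find_predicate(code, predicate, idx)
def pvFindPred (cs : List Char) (p : List Char → Nat → Bool) (idx : Nat) : Nat :=
  if idx < cs.length ∧ ¬ p cs idx = true then pvFindPred cs p (idx + 1) else idx
termination_by cs.length - idx

-- the outer 'while code:' loop of A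
def pvSplitA (cs : List Char) : List (List Char) :=
  if hcs : cs = [] then []
  else
    let idx := pvFindPred cs pvNoncodeStart 0
    let block := cs.take idx
    let rest := cs.drop idx
    (if block ≠ [] then [block] else []) ++
      (if hr : rest = [] then []
       else
         let e :=
           if pvIsQuote rest 0 then pvFindPred rest pvIsQuote 1
           else if pvMlStart rest 0 then pvFindPred rest pvMlEnd 2
           else if pvSlStart rest 0 then pvFindPred rest pvSlEnd 2
           else 0
         let block2 := rest.take (e + 1)
         let rest2 := rest.drop (e + 1)
         (if block2 ≠ [] then [block2] else []) ++ pvSplitA rest2)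
termination_by cs.length
decreasing_by
  simp only [List.length_drop]
  have h2 : idx < cs.length := by
    by_contra hdx
    exact hr (List.drop_eq_nil_iff.mpr (by omega))
  omega

def split_code_into_blocks (code : String) : List String :=
  (pvSplitA code.toList).map (fun b => String.ofList b)

-- ===== PORT B =====
-- the inner 'while j < n and not (...)' loops of Source B
def pvCloseQ (cs : List Char) (j : Nat) : Nat :=
  if j < cs.length ∧ ¬ (cs.getD j ' ' == '"' && !(cs.getD (j - 1) ' ' == '\\')) = true then
    pvCloseQ cs (j + 1)
  else j
termination_by cs.length - j

def pvCloseML (cs : List Char) (j : Nat) : Nat :=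
  if j < cs.length ∧ ¬ (cs.getD (j - 1) ' ' == '*' && cs.getD j ' ' == '/') = true then
    pvCloseML cs (j + 1)
  else j
termination_by cs.length - j

def pvCloseSL (cs : List Char) (j : Nat) : Nat :=
  if j < cs.length ∧ ¬ (decide (j + 1 < cs.length) && (cs.getD (j + 1) ' ' == '\n')) = true then
    pvCloseSL cs (j + 1)
  else j
termination_by cs.length - j

theorem pvCloseQ_ge (cs : List Char) (j : Nat) : j ≤ pvCloseQ cs j := by
  fun_induction pvCloseQ cs j <;> omega

theorem pvCloseML_ge (cs : List Char) (j : Nat) : j ≤ pvCloseML cs j := by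
  fun_induction pvCloseML cs j <;> omega

theorem pvCloseSL_ge (cs : List Char) (j : Nat) : j ≤ pvCloseSL cs j := by
  fun_induction pvCloseSL cs j <;> omega

-- code[a:b] for 0 ≤ a ≤ b
def pvSlice (cs : List Char) (a b : Nat) : List Char := (cs.drop a).take (b - a)

-- the main 'while i < n' loop of Source B; i = scan position, f = start of pending code block
def pvSplitB (cs : List Char) (i f : Nat) : List (List Char) :=
  if hi : i < cs.length then
    if cs.getD i ' ' == '"' && (decide (i = f) || !(cs.getD (i - 1) ' ' == '\\')) then
      let e := min (pvCloseQ cs (i + 1) + 1) cs.length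
      (if f < i then [pvSlice cs f i] else []) ++ [pvSlice cs i e] ++ pvSplitB cs e e
    else if (cs.drop i).take 2 == ['/', '*'] then
      let e := min (pvCloseML cs (i + 2) + 1) cs.length
      (if f < i then [pvSlice cs f i] else []) ++ [pvSlice cs i e] ++ pvSplitB cs e e
    else if (cs.drop i).take 2 == ['/', '/'] then
      let e := min (pvCloseSL cs (i + 2) + 1) cs.length
      (if f < i then [pvSlice cs f i] else []) ++ [pvSlice cs i e] ++ pvSplitB cs e e
    else pvSplitB cs (i + 1) f
  else if f < cs.length then [pvSlice cs f cs.length] else []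
termination_by cs.length - i
decreasing_by
  · have := pvCloseQ_ge cs (i + 1); omega
  · have := pvCloseML_ge cs (i + 2); omega
  · have := pvCloseSL_ge cs (i + 2); omega
  · omega

def split_code_into_blocks_alt (code : String) : List String :=
  (pvSplitB code.toList 0 0).map (fun b => String.ofList b)

-- ===== PRECONDITION & SPEC =====
def Spec_split_code_into_blocks (code : String) (out : List String) : Prop := out = split_code_into_blocks_alt code
instance (code : String) (out : List String) : Decidable (Spec_split_code_into_blocks code out) := by unfold Spec_split_code_into_blocks; infer_instance

-- ===== CLAIM (what is proved, stated in full; the proofs are below) =====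
def Claim_equal_split_code_into_blocks : Prop := ∀ (code : String), Dom_split_code_into_blocks code → Spec_split_code_into_blocks code (split_code_into_blocks code)

-- ===== LEMMAS AND PROOFS =====

-- B's outer-scan trigger condition at absolute position p with frame start f (proof-only)
def trigB (cs : List Char) (f p : Nat) : Bool :=
  (cs.getD p ' ' == '"' && (decide (p = f) || !(cs.getD (p - 1) ' ' == '\\'))) ||
  ((cs.drop p).take 2 == ['/', '*']) ||
  ((cs.drop p).take 2 == ['/', '/'])

theorem getD_drop (cs : List Char) (f r : Nat) (d : Char) :
    (cs.drop f).getD r d = cs.getD (f + r) d := by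
  simp [List.getD_eq_getElem?_getD, List.getElem?_drop]

theorem take2_len (cs : List Char) (p : Nat) (a b : Char)
    (h : ((cs.drop p).take 2 == [a, b]) = true) : p + 2 ≤ cs.length := by
  rw [beq_iff_eq] at h
  have := congrArg List.length h
  simp at this
  omega

theorem take2_getD (cs : List Char) (p : Nat) (hp : p + 1 < cs.length) (a b : Char) :
    ((cs.drop p).take 2 == [a, b]) = (cs.getD p ' ' == a && cs.getD (p + 1) ' ' == b) := by
  have h0 : (cs.drop p).getD 0 ' ' = cs.getD p ' ' := by simpa using getD_drop cs p 0 ' '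
  have h1 : (cs.drop p).getD 1 ' ' = cs.getD (p + 1) ' ' := by rw [getD_drop]
  rcases hd : cs.drop p with _ | ⟨x, _ | ⟨y, t⟩⟩
  · have := congrArg List.length hd; simp at this; omega
  · have := congrArg List.length hd; simp at this; omega
  · rw [hd] at h0 h1
    simp at h0 h1
    rw [Bool.eq_iff_iff]
    simp [beq_iff_eq, h0, h1]

theorem quote_abs (cs : List Char) (f r : Nat) (hf : f ≤ cs.length) :
    pvIsQuote (cs.drop f) r =
      (cs.getD (f + r) ' ' == '"' && (decide (f + r = f) || !(cs.getD (f + r - 1) ' ' == '\\'))) := by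
  unfold pvIsQuote
  by_cases hr : f + r < cs.length
  · have hd : decide (r < (cs.drop f).length) = true := by simp; omega
    rw [hd, getD_drop]
    by_cases hr0 : r = 0
    · subst hr0; simp
    · have e1 : decide (r = 0) = false := by simp [hr0]
      have e2 : decide (f + r = f) = false := by simp; omega
      have e3 : (cs.drop f).getD (r - 1) ' ' = cs.getD (f + r - 1) ' ' := by
        rw [getD_drop]; congr 1; omega
      rw [e1, e2, e3]
      simp
  · have hd : decide (r < (cs.drop f).length) = false := by simp; omega
    have hg : cs.getD (f + r) ' ' = ' ' := List.getD_eq_default _ _ (by omega)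
    rw [hd, hg]
    simp

theorem take2_abs (cs : List Char) (f r : Nat) (a b : Char) (hf : f ≤ cs.length) :
    (decide (r + 2 ≤ (cs.drop f).length) && (((cs.drop f).drop r).take 2 == [a, b])) =
      ((cs.drop (f + r)).take 2 == [a, b]) := by
  rw [List.drop_drop]
  by_cases h : ((cs.drop (f + r)).take 2 == [a, b]) = true
  · have := take2_len cs (f + r) a b h
    have hd : decide (r + 2 ≤ (cs.drop f).length) = true := by simp; omega
    rw [hd, h]; rfl
  · rw [Bool.not_eq_true] at h
    rw [h]; simp

theorem mlStart_abs (cs : List Char) (f r : Nat) (hf : f ≤ cs.length) :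
    pvMlStart (cs.drop f) r = ((cs.drop (f + r)).take 2 == ['/', '*']) := by
  unfold pvMlStart; exact take2_abs cs f r '/' '*' hf

theorem slStart_abs (cs : List Char) (f r : Nat) (hf : f ≤ cs.length) :
    pvSlStart (cs.drop f) r = ((cs.drop (f + r)).take 2 == ['/', '/']) := by
  unfold pvSlStart; exact take2_abs cs f r '/' '/' hf

theorem nc_abs (cs : List Char) (f r : Nat) (hf : f ≤ cs.length) :
    pvNoncodeStart (cs.drop f) r = trigB cs f (f + r) := by
  unfold pvNoncodeStart trigB
  rw [quote_abs cs f r hf, mlStart_abs cs f r hf, slStart_abs cs f r hf]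

theorem findPred_stop (s : List Char) (p : List Char → Nat → Bool) (a : Nat)
    (h : ¬(a < s.length ∧ ¬ p s a = true)) : pvFindPred s p a = a := by
  rw [pvFindPred, if_neg h]

theorem findPred_step (s : List Char) (p : List Char → Nat → Bool) (a : Nat)
    (h1 : a < s.length) (h2 : p s a = false) : pvFindPred s p a = pvFindPred s p (a + 1) := by
  rw [pvFindPred, if_pos ⟨h1, by simp [h2]⟩]

theorem findPred_eq (s : List Char) (p : List Char → Nat → Bool) (b : Nat)
    (hb : b ≤ s.length) (hstop : b = s.length ∨ p s b = true) :
    ∀ (k a : Nat), b - a ≤ k → a ≤ b → (∀ r, a ≤ r → r < b → p s r = false) →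
      pvFindPred s p a = b := by
  intro k
  induction k with
  | zero =>
    intro a hk hab _
    have hab' : a = b := by omega
    subst hab'
    apply findPred_stop
    rcases hstop with h | h
    · omega
    · simp [h]
  | succ k ih =>
    intro a hk hab hfalse
    by_cases hab' : a = b
    · subst hab'
      apply findPred_stop
      rcases hstop with h | h
      · omega
      · simp [h]
    · have ha : a < b := by omega
      rw [findPred_step s p a (by omega) (hfalse a (le_refl a) ha)]
      exact ih (a + 1) (by omega) (by omega) (fun r h1 h2 => hfalse r (by omega) h2)

theorem syncQ (cs : List Char) (i : Nat) (hi : i ≤ cs.length) :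
    ∀ (k j : Nat), cs.length - j ≤ k → i + 1 ≤ j →
      pvCloseQ cs j = i + pvFindPred (cs.drop i) pvIsQuote (j - i) := by
  intro k
  induction k with
  | zero =>
    intro j hk hij
    rw [pvCloseQ, if_neg (by omega), findPred_stop _ _ _ (by simp; omega)]
    omega
  | succ k ih =>
    intro j hk hij
    have hq : pvIsQuote (cs.drop i) (j - i) =
        (cs.getD j ' ' == '"' && !(cs.getD (j - 1) ' ' == '\\')) := by
      have := quote_abs cs i (j - i) hi
      rw [show i + (j - i) = j by omega] at this
      rw [this, show (decide (j = i)) = false by simp; omega]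
      simp
    by_cases hj : j < cs.length
    · by_cases hp : (cs.getD j ' ' == '"' && !(cs.getD (j - 1) ' ' == '\\')) = true
      · rw [pvCloseQ, if_neg (fun h => h.2 hp)]
        rw [findPred_stop _ _ _ (fun h => h.2 (hq.trans hp))]
        omega
      · rw [Bool.not_eq_true] at hp
        rw [pvCloseQ, if_pos ⟨hj, by rw [hp]; simp⟩]
        rw [findPred_step _ _ _ (by simp; omega) (by rw [hq, hp])]
        rw [show j - i + 1 = (j + 1) - i by omega]
        exact ih (j + 1) (by omega) (by omega)
    · rw [pvCloseQ, if_neg (by omega), findPred_stop _ _ _ (by simp; omega)]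
      omega

theorem syncML (cs : List Char) (i : Nat) (hi : i ≤ cs.length) :
    ∀ (k j : Nat), cs.length - j ≤ k → i + 2 ≤ j →
      pvCloseML cs j = i + pvFindPred (cs.drop i) pvMlEnd (j - i) := by
  intro k
  induction k with
  | zero =>
    intro j hk hij
    rw [pvCloseML, if_neg (by omega), findPred_stop _ _ _ (by simp; omega)]
    omega
  | succ k ih =>
    intro j hk hij
    by_cases hj : j < cs.length
    · have hq : pvMlEnd (cs.drop i) (j - i) =
          (cs.getD (j - 1) ' ' == '*' && cs.getD j ' ' == '/') := by
        unfold pvMlEnd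
        rw [show (cs.drop i).drop (j - i - 1) = cs.drop (j - 1) by
          rw [List.drop_drop]; congr 1; omega]
        rw [take2_getD cs (j - 1) (by omega) '*' '/',
          show j - 1 + 1 = j by omega]
        have e1 : decide (1 ≤ j - i) = true := by simp; omega
        have e2 : decide (j - i + 1 ≤ (cs.drop i).length) = true := by simp; omega
        rw [e1, e2]
        simp
      by_cases hp : (cs.getD (j - 1) ' ' == '*' && cs.getD j ' ' == '/') = true
      · rw [pvCloseML, if_neg (fun h => h.2 hp)]
        rw [findPred_stop _ _ _ (fun h => h.2 (hq.trans hp))]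
        omega
      · rw [Bool.not_eq_true] at hp
        rw [pvCloseML, if_pos ⟨hj, by rw [hp]; simp⟩]
        rw [findPred_step _ _ _ (by simp; omega) (by rw [hq, hp])]
        rw [show j - i + 1 = (j + 1) - i by omega]
        exact ih (j + 1) (by omega) (by omega)
    · rw [pvCloseML, if_neg (by omega), findPred_stop _ _ _ (by simp; omega)]
      omega

theorem syncSL (cs : List Char) (i : Nat) (hi : i ≤ cs.length) :
    ∀ (k j : Nat), cs.length - j ≤ k → i + 2 ≤ j →
      pvCloseSL cs j = i + pvFindPred (cs.drop i) pvSlEnd (j - i) := by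
  intro k
  induction k with
  | zero =>
    intro j hk hij
    rw [pvCloseSL, if_neg (by omega), findPred_stop _ _ _ (by simp; omega)]
    omega
  | succ k ih =>
    intro j hk hij
    have hq : pvSlEnd (cs.drop i) (j - i) =
        (decide (j + 1 < cs.length) && (cs.getD (j + 1) ' ' == '\n')) := by
      unfold pvSlEnd
      rw [show (cs.drop i).getD (j - i + 1) ' ' = cs.getD (j + 1) ' ' by
        rw [getD_drop]; congr 1; omega]
      have e : decide (j - i + 1 < (cs.drop i).length) = decide (j + 1 < cs.length) := by
        rw [decide_eq_decide]; simp; omega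
      rw [e]
    by_cases hj : j < cs.length
    · by_cases hp : (decide (j + 1 < cs.length) && (cs.getD (j + 1) ' ' == '\n')) = true
      · rw [pvCloseSL, if_neg (fun h => h.2 hp)]
        rw [findPred_stop _ _ _ (fun h => h.2 (hq.trans hp))]
        omega
      · rw [Bool.not_eq_true] at hp
        rw [pvCloseSL, if_pos ⟨hj, by rw [hp]; simp⟩]
        rw [findPred_step _ _ _ (by simp; omega) (by rw [hq, hp])]
        rw [show j - i + 1 = (j + 1) - i by omega]
        exact ih (j + 1) (by omega) (by omega)
    · rw [pvCloseSL, if_neg (by omega), findPred_stop _ _ _ (by simp; omega)]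
      omega

theorem take_min_length (l : List Char) (a : Nat) : l.take (min a l.length) = l.take a := by
  rcases Nat.le_total a l.length with h | h
  · rw [Nat.min_eq_left h]
  · rw [Nat.min_eq_right h, List.take_of_length_le h, List.take_length]

theorem branch_assemble (cs : List Char) (i f c : Nat) (hf : f ≤ i) (hi : i < cs.length)
    (hc : i + 1 ≤ c)
    (hrec : pvSplitB cs (min (c + 1) cs.length) (min (c + 1) cs.length) =
      pvSplitA (cs.drop (min (c + 1) cs.length))) :
    (if f < i then [pvSlice cs f i] else []) ++ [pvSlice cs i (min (c + 1) cs.length)] ++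
        pvSplitB cs (min (c + 1) cs.length) (min (c + 1) cs.length) =
      (if (cs.drop f).take (i - f) ≠ [] then [(cs.drop f).take (i - f)] else []) ++
        ((if (cs.drop i).take (c - i + 1) ≠ [] then [(cs.drop i).take (c - i + 1)] else []) ++
          pvSplitA ((cs.drop i).drop (c - i + 1))) := by
  have h1 : (if f < i then [pvSlice cs f i] else []) =
      (if (cs.drop f).take (i - f) ≠ [] then [(cs.drop f).take (i - f)] else []) := by
    by_cases h : f < i
    · rw [if_pos h, if_pos (by simp [List.take_eq_nil_iff]; omega)]
      rfl
    · rw [if_neg h, if_neg (by simp [List.take_eq_nil_iff]; omega)]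
  have h2 : pvSlice cs i (min (c + 1) cs.length) = (cs.drop i).take (c - i + 1) := by
    unfold pvSlice
    rw [show min (c + 1) cs.length - i = min (c - i + 1) (cs.drop i).length by simp; omega]
    rw [take_min_length]
  have h3 : (if (cs.drop i).take (c - i + 1) ≠ [] then [(cs.drop i).take (c - i + 1)] else []) =
      [(cs.drop i).take (c - i + 1)] := by
    rw [if_pos (by simp [List.take_eq_nil_iff]; omega)]
  have h4 : (cs.drop i).drop (c - i + 1) = cs.drop (min (c + 1) cs.length) := by
    rw [List.drop_drop]
    rcases Nat.le_total (c + 1) cs.length with h | h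
    · rw [Nat.min_eq_left h]; congr 1; omega
    · rw [Nat.min_eq_right h, List.drop_length, List.drop_eq_nil_iff.mpr (by omega)]
  rw [h1, h2, h3, h4, hrec, List.append_assoc]

-- A's outer find_predicate lands exactly on the first trigger position
theorem findA_eq_of_trig (cs : List Char) (i f : Nat) (hf : f ≤ i) (hi : i < cs.length)
    (hfalse : ∀ p, f ≤ p → p < i → trigB cs f p = false) (htrig : trigB cs f i = true) :
    pvFindPred (cs.drop f) pvNoncodeStart 0 = i - f := by
  apply findPred_eq (cs.drop f) pvNoncodeStart (i - f) (by simp; omega)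
    (Or.inr (by rw [nc_abs cs f (i - f) (by omega), show f + (i - f) = i by omega]; exact htrig))
    (i - f) 0 (by omega) (by omega)
  intro r _ hr
  rw [nc_abs cs f r (by omega)]
  exact hfalse (f + r) (by omega) (by omega)

-- the terminal case: the scan has reached the end of the string
theorem splitB_base (cs : List Char) (i f : Nat) (hi : i = cs.length) (hf : f ≤ i)
    (hfalse : ∀ p, f ≤ p → p < i → trigB cs f p = false) :
    pvSplitB cs i f = pvSplitA (cs.drop f) := by
  subst hi
  rw [pvSplitB, dif_neg (by omega)]
  by_cases hfl : f < cs.length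
  · rw [if_pos hfl]
    have hidx : pvFindPred (cs.drop f) pvNoncodeStart 0 = cs.length - f := by
      apply findPred_eq (cs.drop f) pvNoncodeStart (cs.length - f) (by simp) (Or.inl (by simp))
        (cs.length - f) 0 (by omega) (by omega)
      intro r _ hr
      rw [nc_abs cs f r (by omega)]
      exact hfalse (f + r) (by omega) (by omega)
    rw [pvSplitA, dif_neg (by simp [List.drop_eq_nil_iff]; omega)]
    simp only [hidx]
    rw [List.take_of_length_le (by simp), dif_pos (by simp [List.drop_eq_nil_iff]; omega)]
    rw [if_pos (by simp [List.drop_eq_nil_iff]; omega)]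
    unfold pvSlice
    rw [List.take_of_length_le (by simp)]
    simp
  · rw [if_neg hfl]
    have hfe : f = cs.length := by omega
    subst hfe
    rw [List.drop_length, pvSplitA, dif_pos rfl]

theorem splitB_eq_splitA_main (cs : List Char) :
    ∀ (k i f : Nat), cs.length - i ≤ k → f ≤ i → i ≤ cs.length →
      (∀ p, f ≤ p → p < i → trigB cs f p = false) →
      pvSplitB cs i f = pvSplitA (cs.drop f) := by
  intro k
  induction k with
  | zero =>
    intro i f hk hf hi hfalse
    exact splitB_base cs i f (by omega) hf hfalse
  | succ k ih =>
    intro i f hk hf hi hfalse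
    by_cases hil : i < cs.length
    · by_cases hcq : (cs.getD i ' ' == '"' && (decide (i = f) || !(cs.getD (i - 1) ' ' == '\\'))) = true
      · -- string-literal branch
        have htrig : trigB cs f i = true := by unfold trigB; rw [hcq]; simp
        have hgq : (cs.getD i ' ' == '"') = true := by
          cases hx : (cs.getD i ' ' == '"')
          · rw [hx] at hcq; simp at hcq
          · rfl
        have hidx := findA_eq_of_trig cs i f hf hil hfalse htrig
        have hqr : pvIsQuote (cs.drop i) 0 = true := by
          rw [quote_abs cs i 0 (by omega)]
          simp only [Nat.add_zero]
          rw [hgq]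
          simp
        have hsync := syncQ cs i (by omega) cs.length (i + 1) (by omega) (by omega)
        have hcge := pvCloseQ_ge cs (i + 1)
        rw [show i + 1 - i = 1 by omega] at hsync
        rw [pvSplitB, dif_pos hil, if_pos hcq]
        rw [pvSplitA, dif_neg (by simp [List.drop_eq_nil_iff]; omega)]
        simp only [hidx]
        rw [show (cs.drop f).drop (i - f) = cs.drop i by rw [List.drop_drop]; congr 1; omega]
        rw [dif_neg (by simp [List.drop_eq_nil_iff]; omega), if_pos hqr]
        have hrec := ih (min (pvCloseQ cs (i + 1) + 1) cs.length)
          (min (pvCloseQ cs (i + 1) + 1) cs.length) (by omega) (le_refl _) (by omega)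
          (fun p h1 h2 => absurd (lt_of_le_of_lt h1 h2) (lt_irrefl _))
        have hasm := branch_assemble cs i f (pvCloseQ cs (i + 1)) hf hil (by omega) hrec
        rw [show pvCloseQ cs (i + 1) - i = pvFindPred (cs.drop i) pvIsQuote 1 by omega] at hasm
        exact hasm
      · rw [Bool.not_eq_true] at hcq
        by_cases hcm : ((cs.drop i).take 2 == ['/', '*']) = true
        · -- multi-line comment branch
          have htrig : trigB cs f i = true := by unfold trigB; rw [hcm]; simp
          have hlen2 := take2_len cs i '/' '*' hcm
          have hget := hcm
          rw [take2_getD cs i (by omega) '/' '*'] at hget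
          have hg0 : (cs.getD i ' ' == '/') = true := by
            cases hx : (cs.getD i ' ' == '/')
            · rw [hx] at hget; simp at hget
            · rfl
          have hidx := findA_eq_of_trig cs i f hf hil hfalse htrig
          have hqr : pvIsQuote (cs.drop i) 0 = false := by
            rw [quote_abs cs i 0 (by omega)]
            simp only [Nat.add_zero]
            have h' : cs.getD i ' ' = '/' := by simpa using hg0
            rw [h']
            simp
          have hmr : pvMlStart (cs.drop i) 0 = true := by
            unfold pvMlStart
            rw [List.drop_zero, hcm]
            simp
            omega
          have hsync := syncML cs i (by omega) cs.length (i + 2) (by omega) (by omega)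
          have hcge := pvCloseML_ge cs (i + 2)
          rw [show i + 2 - i = 2 by omega] at hsync
          rw [pvSplitB, dif_pos hil, if_neg (by rw [hcq]; simp), if_pos hcm]
          rw [pvSplitA, dif_neg (by simp [List.drop_eq_nil_iff]; omega)]
          simp only [hidx]
          rw [show (cs.drop f).drop (i - f) = cs.drop i by rw [List.drop_drop]; congr 1; omega]
          rw [dif_neg (by simp [List.drop_eq_nil_iff]; omega), if_neg (show ¬pvIsQuote (cs.drop i) 0 = true by rw [hqr]; simp),
            if_pos hmr]
          have hrec := ih (min (pvCloseML cs (i + 2) + 1) cs.length)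
            (min (pvCloseML cs (i + 2) + 1) cs.length) (by omega) (le_refl _) (by omega)
            (fun p h1 h2 => absurd (lt_of_le_of_lt h1 h2) (lt_irrefl _))
          have hasm := branch_assemble cs i f (pvCloseML cs (i + 2)) hf hil (by omega) hrec
          rw [show pvCloseML cs (i + 2) - i = pvFindPred (cs.drop i) pvMlEnd 2 by omega] at hasm
          exact hasm
        · rw [Bool.not_eq_true] at hcm
          by_cases hcs2 : ((cs.drop i).take 2 == ['/', '/']) = true
          · -- single-line comment branch
            have htrig : trigB cs f i = true := by unfold trigB; rw [hcs2]; simp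
            have hlen2 := take2_len cs i '/' '/' hcs2
            have hget := hcs2
            rw [take2_getD cs i (by omega) '/' '/'] at hget
            have hg0 : (cs.getD i ' ' == '/') = true := by
              cases hx : (cs.getD i ' ' == '/')
              · rw [hx] at hget; simp at hget
              · rfl
            have hidx := findA_eq_of_trig cs i f hf hil hfalse htrig
            have hqr : pvIsQuote (cs.drop i) 0 = false := by
              rw [quote_abs cs i 0 (by omega)]
              simp only [Nat.add_zero]
              have h' : cs.getD i ' ' = '/' := by simpa using hg0
              rw [h']
              simp
            have hmr : pvMlStart (cs.drop i) 0 = false := by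
              unfold pvMlStart
              rw [List.drop_zero, hcm]
              simp
            have hsr : pvSlStart (cs.drop i) 0 = true := by
              unfold pvSlStart
              rw [List.drop_zero, hcs2]
              simp
              omega
            have hsync := syncSL cs i (by omega) cs.length (i + 2) (by omega) (by omega)
            have hcge := pvCloseSL_ge cs (i + 2)
            rw [show i + 2 - i = 2 by omega] at hsync
            rw [pvSplitB, dif_pos hil, if_neg (by rw [hcq]; simp),
              if_neg (by rw [hcm]; simp), if_pos hcs2]
            rw [pvSplitA, dif_neg (by simp [List.drop_eq_nil_iff]; omega)]
            simp only [hidx]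
            rw [show (cs.drop f).drop (i - f) = cs.drop i by rw [List.drop_drop]; congr 1; omega]
            rw [dif_neg (by simp [List.drop_eq_nil_iff]; omega), if_neg (show ¬pvIsQuote (cs.drop i) 0 = true by rw [hqr]; simp),
              if_neg (show ¬pvMlStart (cs.drop i) 0 = true by rw [hmr]; simp), if_pos hsr]
            have hrec := ih (min (pvCloseSL cs (i + 2) + 1) cs.length)
              (min (pvCloseSL cs (i + 2) + 1) cs.length) (by omega) (le_refl _) (by omega)
              (fun p h1 h2 => absurd (lt_of_le_of_lt h1 h2) (lt_irrefl _))
            have hasm := branch_assemble cs i f (pvCloseSL cs (i + 2)) hf hil (by omega) hrec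
            rw [show pvCloseSL cs (i + 2) - i = pvFindPred (cs.drop i) pvSlEnd 2 by omega] at hasm
            exact hasm
          · -- no trigger at i: advance the scan
            rw [Bool.not_eq_true] at hcs2
            rw [pvSplitB, dif_pos hil, if_neg (by rw [hcq]; simp),
              if_neg (by rw [hcm]; simp), if_neg (by rw [hcs2]; simp)]
            apply ih (i + 1) f (by omega) (by omega) (by omega)
            intro p h1 h2
            by_cases hp : p = i
            · subst hp
              unfold trigB
              rw [hcq, hcm, hcs2]
              simp
            · exact hfalse p h1 (by omega)
    · exact splitB_base cs i f (by omega) hf hfalse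

theorem pvSplitB_eq_pvSplitA (cs : List Char) (f : Nat) (hf : f ≤ cs.length) :
    pvSplitB cs f f = pvSplitA (cs.drop f) :=
  splitB_eq_splitA_main cs cs.length f f (by omega) (le_refl f) hf
    (fun p h1 h2 => absurd (lt_of_le_of_lt h1 h2) (lt_irrefl f))

-- ===== VERDICT (by name: the statement is the Claim_ definition above) =====
theorem split_code_into_blocks_spec : Claim_equal_split_code_into_blocks := by
  intro code _
  unfold Spec_split_code_into_blocks split_code_into_blocks split_code_into_blocks_alt
  rw [pvSplitB_eq_pvSplitA code.toList 0 (Nat.zero_le _), List.drop_zero]
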